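-- pv_equiv track=rewrite | github.com/mikelxk/leetcode | python/Interview/Samsara/performQuery.py | performQuery
-- ===== SOURCE A (Python) =====
-- from collections import Counter
-- from typing import List
--
-- def performQuery(a: List[int], b: List[int], query: List[List[int]]):
--     res = []
--     ca = Counter(a)
--     cb = Counter(b)
--     for q in query:
--         op = q[0]
--         if op == 0:
--             [i, x] = [q[1], q[2]]
--             cb[b[i]] -= 1
--             b[i] += x
--             cb[b[i]] += 1
--         elif op == 1:
--             sum = q[1]
--             cnt = 0
--             for (k, v) in ca.items():
--                 compliment = sum - k
--                 if (cb[compliment] != 0):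
--                     cnt += v*cb[compliment]
--             res.append(cnt)
--     return res
-- ===== SOURCE B (Python) =====
-- from collections import Counter
-- from typing import List
--
--
-- def performQuery(a: List[int], b: List[int], query: List[List[int]]):
--     # Simpler: keep only a Counter of a; answer a sum query by scanning b
--     # directly (sum of ca[s - y]) instead of maintaining a Counter of b and
--     # scanning ca's items.  Mutates b in place exactly like the original.
--     ca = Counter(a)
--     res = []
--     for q in query:
--         if q[0] == 0:
--             b[q[1]] += q[2]
--         elif q[0] == 1:
--             s = q[1]
--             res.append(sum(ca[s - y] for y in b))
--     return res
-- ===== Notes on version B (the rewrite author's own statement) =====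
-- stated objective: simpler
-- what changed: B drops the maintained Counter of b entirely: an update just mutates b, and a pair-sum query is answered by summing ca[s-y] over the list b instead of scanning ca.items() against a Counter of b kept in sync by the updates.
import Mathlib
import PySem

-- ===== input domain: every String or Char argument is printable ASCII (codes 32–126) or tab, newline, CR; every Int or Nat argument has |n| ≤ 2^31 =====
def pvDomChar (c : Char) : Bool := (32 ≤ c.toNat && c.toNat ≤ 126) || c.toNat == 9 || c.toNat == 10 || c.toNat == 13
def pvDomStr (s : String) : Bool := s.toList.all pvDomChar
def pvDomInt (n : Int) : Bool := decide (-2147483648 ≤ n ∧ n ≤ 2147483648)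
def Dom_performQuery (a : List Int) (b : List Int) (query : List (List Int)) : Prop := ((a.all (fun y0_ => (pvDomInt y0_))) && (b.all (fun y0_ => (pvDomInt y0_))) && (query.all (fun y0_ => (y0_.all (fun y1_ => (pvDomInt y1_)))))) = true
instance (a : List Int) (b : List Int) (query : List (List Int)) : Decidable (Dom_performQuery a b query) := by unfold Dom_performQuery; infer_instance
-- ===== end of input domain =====

-- Both Pythons mutate the argument list b in place (the same mutation); the claim here is about the return value.
-- B is simpler: it keeps no Counter of b — updates just mutate b, and a sum query sums ca[s-y] over the list b.

-- ===== PORT A =====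
-- inner loop 'for (k, v) in ca.items(): …'
def pqCntA (ca cb : PySem.Dict Int Int) (s : Int) : Int :=
  ca.items.foldl (fun cnt kv =>
    if cb.getD (s - kv.1) 0 ≠ 0 then cnt + kv.2 * cb.getD (s - kv.1) 0 else cnt) 0

def pqStepA (ca : PySem.Dict Int Int) (st : List Int × List Int × PySem.Dict Int Int)
    (q : List Int) : List Int × List Int × PySem.Dict Int Int :=
  let res := st.1; let b := st.2.1; let cb := st.2.2
  let op := PySem.List.pyGetD q 0 0
  if op = 0 then
    let i := PySem.List.pyGetD q 1 0
    let x := PySem.List.pyGetD q 2 0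
    let cb1 := cb.modify (PySem.List.pyGetD b i 0) 0 (· - 1)
    let b1 := PySem.List.pySetD b i (PySem.List.pyGetD b i 0 + x)
    let cb2 := cb1.modify (PySem.List.pyGetD b1 i 0) 0 (· + 1)
    (res, b1, cb2)
  else if op = 1 then
    (res ++ [pqCntA ca cb (PySem.List.pyGetD q 1 0)], b, cb)
  else (res, b, cb)

def performQuery (a : List Int) (b : List Int) (query : List (List Int)) : List Int :=
  let ca := PySem.Dict.counter a
  (query.foldl (pqStepA ca) ([], b, PySem.Dict.counter b)).1

-- ===== PORT B =====
def pqStepB (ca : PySem.Dict Int Int) (st : List Int × List Int) (q : List Int) :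
    List Int × List Int :=
  let res := st.1; let b := st.2
  let op := PySem.List.pyGetD q 0 0
  if op = 0 then
    let i := PySem.List.pyGetD q 1 0
    (res, PySem.List.pySetD b i (PySem.List.pyGetD b i 0 + PySem.List.pyGetD q 2 0))
  else if op = 1 then
    let s := PySem.List.pyGetD q 1 0
    (res ++ [(b.map (fun y => ca.getD (s - y) 0)).sum], b)
  else (res, b)

def performQuery_alt (a : List Int) (b : List Int) (query : List (List Int)) : List Int :=
  let ca := PySem.Dict.counter a
  (query.foldl (pqStepB ca) ([], b)).1

-- ===== PRECONDITION & SPEC =====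
-- Pre_ excludes exactly the inputs on which A raises IndexError: a query shorter than its opcode
-- needs (q[0], and q[1]/q[2] for ops 0/1) or an update index outside range(-len(b), len(b)).
def Pre_performQuery (a : List Int) (b : List Int) (query : List (List Int)) : Prop :=
  ∀ q ∈ query, q ≠ [] ∧
    (PySem.List.pyGetD q 0 0 = 0 → 3 ≤ q.length ∧ PySem.Raise.InRange b.length (PySem.List.pyGetD q 1 0)) ∧
    (PySem.List.pyGetD q 0 0 = 1 → 2 ≤ q.length)
instance (a : List Int) (b : List Int) (query : List (List Int)) : Decidable (Pre_performQuery a b query) := by unfold Pre_performQuery; infer_instance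

def pvWitness_performQuery : List Int × List Int × List (List Int) :=
  ([1, 2, 2], [3, 4], [[1, 5], [0, -1, 2], [1, 7], [2, 9]])

def Spec_performQuery (a : List Int) (b : List Int) (query : List (List Int)) (out : List Int) : Prop := out = performQuery_alt a b query
instance (a : List Int) (b : List Int) (query : List (List Int)) (out : List Int) : Decidable (Spec_performQuery a b query out) := by unfold Spec_performQuery; infer_instance

-- ===== CLAIM (what is proved, stated in full; the proofs are below) =====
def Claim_equal_performQuery : Prop := ∀ (a : List Int) (b : List Int) (query : List (List Int)), Dom_performQuery a b query → Pre_performQuery a b query → Spec_performQuery a b query (performQuery a b query)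

-- ===== LEMMAS AND PROOFS =====

-- canonical nonnegative index of a Python index that is in range
def pyCanon (len : Nat) (i : Int) : Nat := if 0 ≤ i then i.toNat else len - (-i).toNat

theorem pyIdx_inrange {len : Nat} {i : Int} (h : PySem.Raise.InRange len i) :
    PySem.List.pyIdx? len i = some (pyCanon len i) ∧ pyCanon len i < len := by
  rcases h with ⟨h1, h2⟩
  unfold pyCanon PySem.List.pyIdx?
  split
  · simp; omega
  · simp; omega

theorem pyGetD_inrange {xs : List Int} {i : Int} (d : Int)
    (h : PySem.Raise.InRange xs.length i) :
    PySem.List.pyGetD xs i d = xs.getD (pyCanon xs.length i) d := by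
  obtain ⟨hi, hc⟩ := pyIdx_inrange h
  simp [PySem.List.pyGetD, PySem.List.pyGet?, hi, List.getD, hc]

theorem pySetD_inrange {xs : List Int} {i : Int} (v : Int)
    (h : PySem.Raise.InRange xs.length i) :
    PySem.List.pySetD xs i v = xs.set (pyCanon xs.length i) v := by
  obtain ⟨hi, _⟩ := pyIdx_inrange h
  simp [PySem.List.pySetD, PySem.List.pySet?, hi]

-- count after set, as an Int equation
theorem count_set_int (xs : List Int) (n : Nat) (hn : n < xs.length) (v w : Int) :
    ((xs.set n v).count w : Int)
      = (xs.count w : Int) - (if xs[n] = w then 1 else 0) + (if v = w then 1 else 0) := by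
  induction xs generalizing n with
  | nil => simp at hn
  | cons x t ih =>
    cases n with
    | zero =>
      simp only [List.set_cons_zero, List.count_cons, List.getElem_cons_zero, beq_iff_eq]
      split_ifs <;> push_cast <;> omega
    | succ m =>
      simp only [List.set_cons_succ, List.count_cons, List.getElem_cons_succ, beq_iff_eq]
      have := ih m (by simpa using hn)
      split_ifs <;> push_cast at * <;> omega

-- Σ_{k∈D} (if k = z then f k else 0) over a Nodup list D
theorem sum_map_ite_eq (D : List Int) (f : Int → Int) (z : Int) (hD : D.Nodup) :
    (D.map (fun k => if k = z then f k else 0)).sum = if z ∈ D then f z else 0 := by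
  induction D with
  | nil => simp
  | cons d t ih =>
    simp only [List.map_cons, List.sum_cons, List.mem_cons]
    rcases List.nodup_cons.mp hD with ⟨hd, ht⟩
    by_cases hz : d = z
    · subst hz
      simp [ih ht, hd]
    · have hzd : z ≠ d := fun h => hz h.symm
      simp [hz, ih ht, hzd]

-- the double-counting identity between the two query answers
theorem conv_eq (a bb : List Int) (s : Int) :
    ((PySem.Set.ofList a).map (fun k => (a.count k : Int) * (bb.count (s - k) : Int))).sum
      = (bb.map (fun y => ((PySem.Dict.counter a).getD (s - y) 0))).sum := by
  induction bb with
  | nil => simp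
  | cons y t ih =>
    simp only [List.map_cons, List.sum_cons]
    rw [← ih]
    have hsplit :
        ((PySem.Set.ofList a).map (fun k => (a.count k : Int) * ((y :: t).count (s - k) : Int))).sum
          = ((PySem.Set.ofList a).map (fun k => (a.count k : Int) * (t.count (s - k) : Int))).sum
            + ((PySem.Set.ofList a).map (fun k => if k = s - y then (a.count k : Int) else 0)).sum := by
      rw [← List.sum_map_add]
      apply congrArg List.sum
      apply List.map_congr_left
      intro k _
      rw [List.count_cons]
      by_cases hk : k = s - y
      · have hy : s - k = y := by omega
        rw [hy]
        simp [hk]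
        ring
      · have h2 : (y : Int) ≠ s - k := by omega
        simp [hk, h2]
    rw [hsplit, sum_map_ite_eq _ _ _ (PySem.Set.nodup_ofList a)]
    rw [PySem.Dict.getD_counter]
    by_cases hm : s - y ∈ PySem.Set.ofList a
    · simp [hm]; ring
    · have : a.count (s - y) = 0 := by
        rw [List.count_eq_zero]
        intro hmem
        exact hm ((PySem.Set.mem_ofList _ _).mpr hmem)
      simp [hm, this]

-- A's inner scan equals B's sum over b, given cb counts bb
theorem cnt_eq (a bb : List Int) (cb : PySem.Dict Int Int) (s : Int)
    (hcb : ∀ v, cb.getD v 0 = (List.count v bb : Int)) :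
    pqCntA (PySem.Dict.counter a) cb s
      = (bb.map (fun y => ((PySem.Dict.counter a).getD (s - y) 0))).sum := by
  unfold pqCntA
  have h1 : ∀ (init : Int) (l : List (Int × Int)),
      l.foldl (fun cnt kv => if cb.getD (s - kv.1) 0 ≠ 0 then cnt + kv.2 * cb.getD (s - kv.1) 0 else cnt) init
        = init + (l.map (fun kv => kv.2 * cb.getD (s - kv.1) 0)).sum := by
    intro init l
    induction l generalizing init with
    | nil => simp
    | cons p t ih =>
      simp only [List.foldl_cons, List.map_cons, List.sum_cons]
      rw [ih]
      split_ifs with h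
      · ring
      · simp at h; simp [h]
  rw [h1]
  rw [PySem.Dict.items_counter]
  rw [← conv_eq a bb s]
  simp only [List.map_map, zero_add]
  apply congrArg List.sum
  apply List.map_congr_left
  intro k _
  simp [hcb]

-- main loop invariant: B's state (res, b) tracks A's (res, b, cb), where cb counts b
theorem loop_eq (a : List Int) (query : List (List Int)) (blen : Nat) :
    ∀ (res b : List Int) (cb : PySem.Dict Int Int),
      b.length = blen →
      (∀ q ∈ query, q ≠ [] ∧
        (PySem.List.pyGetD q 0 0 = 0 → 3 ≤ q.length ∧ PySem.Raise.InRange blen (PySem.List.pyGetD q 1 0)) ∧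
        (PySem.List.pyGetD q 0 0 = 1 → 2 ≤ q.length)) →
      (∀ v, cb.getD v 0 = (List.count v b : Int)) →
      (query.foldl (pqStepA (PySem.Dict.counter a)) (res, b, cb)).1
        = (query.foldl (pqStepB (PySem.Dict.counter a)) (res, b)).1 := by
  induction query with
  | nil => intro res b cb hlen hpre hcb; simp
  | cons q qs ih =>
    intro res b cb hlen hpre hcb
    simp only [List.foldl_cons]
    have hqs : ∀ q' ∈ qs, q' ≠ [] ∧
        (PySem.List.pyGetD q' 0 0 = 0 → 3 ≤ q'.length ∧ PySem.Raise.InRange blen (PySem.List.pyGetD q' 1 0)) ∧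
        (PySem.List.pyGetD q' 0 0 = 1 → 2 ≤ q'.length) :=
      fun q' h => hpre q' (List.mem_cons_of_mem _ h)
    by_cases hop0 : PySem.List.pyGetD q 0 0 = 0
    · obtain ⟨hlen3, hir⟩ := (hpre q (List.mem_cons_self ..)).2.1 hop0
      have hir' : PySem.Raise.InRange b.length (PySem.List.pyGetD q 1 0) := by rw [hlen]; exact hir
      obtain ⟨_, hc⟩ := pyIdx_inrange hir'
      set i := PySem.List.pyGetD q 1 0 with hidef
      set n := pyCanon b.length i with hndef
      set x := PySem.List.pyGetD q 2 0 with hxdef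
      have hbi : PySem.List.pyGetD b i 0 = b[n] := by
        rw [pyGetD_inrange 0 hir', List.getD_eq_getElem b 0 hc]
      have hset : PySem.List.pySetD b i (b[n] + x) = b.set n (b[n] + x) :=
        pySetD_inrange _ hir'
      have hir2 : PySem.Raise.InRange (b.set n (b[n] + x)).length i := by
        simpa using hir'
      have hc2 : pyCanon (b.set n (b[n] + x)).length i = n := by
        simp [hndef]
      have hbi2 : PySem.List.pyGetD (b.set n (b[n] + x)) i 0 = b[n] + x := by
        rw [pyGetD_inrange 0 hir2, hc2,
          List.getD_eq_getElem _ 0 (by simpa using hc)]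
        simp
      have hstepA : pqStepA (PySem.Dict.counter a) (res, b, cb) q =
          (res, b.set n (b[n] + x),
            (cb.modify b[n] 0 (· - 1)).modify (b[n] + x) 0 (· + 1)) := by
        unfold pqStepA
        simp only [hop0, ← hidef, ← hxdef, hbi, if_true]
        rw [hset, hbi2]
      have hstepB : pqStepB (PySem.Dict.counter a) (res, b) q = (res, b.set n (b[n] + x)) := by
        unfold pqStepB
        simp only [hop0, ← hidef, ← hxdef, hbi, if_true]
        rw [hset]
      rw [hstepA, hstepB]
      apply ih
      · simp [hlen]
      · exact hqs
      · intro v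
        simp only [PySem.Dict.getD_modify]
        rw [count_set_int b n hc (b[n] + x) v]
        simp only [hcb]
        split_ifs <;> simp_all
    · by_cases hop1 : PySem.List.pyGetD q 0 0 = 1
      · have hstepA : pqStepA (PySem.Dict.counter a) (res, b, cb) q =
            (res ++ [pqCntA (PySem.Dict.counter a) cb (PySem.List.pyGetD q 1 0)], b, cb) := by
          unfold pqStepA; simp [hop1]
        have hstepB : pqStepB (PySem.Dict.counter a) (res, b) q =
            (res ++ [(b.map (fun y => (PySem.Dict.counter a).getD (PySem.List.pyGetD q 1 0 - y) 0)).sum], b) := by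
          unfold pqStepB; simp [hop1]
        rw [hstepA, hstepB, cnt_eq a b cb _ hcb]
        exact ih _ b cb hlen hqs hcb
      · have hstepA : pqStepA (PySem.Dict.counter a) (res, b, cb) q = (res, b, cb) := by
          unfold pqStepA; simp [hop0, hop1]
        have hstepB : pqStepB (PySem.Dict.counter a) (res, b) q = (res, b) := by
          unfold pqStepB; simp [hop0, hop1]
        rw [hstepA, hstepB]
        exact ih res b cb hlen hqs hcb

-- ===== VERDICT (by name: the statement is the Claim_ definition above) =====
theorem performQuery_spec : Claim_equal_performQuery := by
  intro a b query _hdom hpre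
  unfold Spec_performQuery performQuery performQuery_alt
  exact loop_eq a query b.length [] b (PySem.Dict.counter b) rfl hpre
    (fun v => PySem.Dict.getD_counter b v)
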